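-- pv_equiv track=rewrite | github.com/nonasking/algorithm-python | PCCP/examples/solo_alphabet.py | solution
-- ===== SOURCE A (Python) =====
-- def check_solo(index, value, input_string):
--     if value in input_string[:index] and input_string[index-1] != value:
--         return True
--     return False
--
-- def solution(input_string):
--     answer = []
--     for i in range(len(input_string)):
--         if check_solo(i, input_string[i], input_string):
--             answer.append(input_string[i])
--     if answer == []:
--         return 'N'
--     answer = list(set(answer))
--     answer.sort()
--     return ''.join(answer)
-- ===== SOURCE B (Python) =====
-- def solution(input_string):
--     # Count maximal runs per character; a char qualifies iff it occupies >= 2 runs.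
--     runs = {}
--     prev = None
--     for ch in input_string:
--         if ch != prev:
--             runs[ch] = runs.get(ch, 0) + 1
--             prev = ch
--     result = sorted(c for c, n in runs.items() if n >= 2)
--     return ''.join(result) if result else 'N'
-- ===== Notes on version B (the rewrite author's own statement) =====
-- stated objective: faster
-- what changed: Replaced the per-index prefix-membership scan (value in input_string[:i]) by a single left-to-right pass that counts each character's maximal runs in a dict and keeps the characters with at least two runs.
import Mathlib
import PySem

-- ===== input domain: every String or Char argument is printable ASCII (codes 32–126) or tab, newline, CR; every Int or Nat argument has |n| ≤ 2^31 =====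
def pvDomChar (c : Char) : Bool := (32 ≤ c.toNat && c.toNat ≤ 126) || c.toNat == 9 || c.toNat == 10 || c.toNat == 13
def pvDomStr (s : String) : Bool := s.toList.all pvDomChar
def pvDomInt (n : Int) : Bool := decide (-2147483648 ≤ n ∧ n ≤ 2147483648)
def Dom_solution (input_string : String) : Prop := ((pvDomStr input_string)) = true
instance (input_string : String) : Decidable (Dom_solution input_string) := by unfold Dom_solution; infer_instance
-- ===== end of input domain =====

-- B replaces A's quadratic index/prefix scan by a single pass counting maximal runs per character (objective: faster).


-- ===== PORT A =====
def check_solo (index : Int) (value : Char) (input_string : List Char) : Bool :=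
  -- 'value in input_string[:index] and input_string[index-1] != value' (short-circuit: the
  -- negative-index access only happens when the prefix is nonempty, exactly as in Python)
  if ((PySem.List.slice input_string none (some index)).contains value)
      && (PySem.List.pyGet? input_string (index - 1) != some value) then true else false

def solution (input_string : String) : String :=
  let s := input_string.toList
  let answer : List Char :=
    (PySem.List.pyRange 0 (PySem.List.len s) 1).foldl
      (fun acc i =>
        if check_solo i (PySem.List.pyGetD s i ' ') s then acc ++ [PySem.List.pyGetD s i ' ']
        else acc) []
  if answer = [] then "N"
  else String.ofList (PySem.List.sorted (PySem.Set.ofList answer) (fun x => x) false)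

-- ===== PORT B =====
def solution_alt (input_string : String) : String :=
  -- one pass: count maximal runs per character, keep the characters with ≥ 2 runs, sorted
  let st := input_string.toList.foldl
    (fun (st : PySem.Dict Char Int × Option Char) ch =>
      if some ch ≠ st.2 then (st.1.insert ch (st.1.getD ch 0 + 1), some ch) else st)
    (PySem.Dict.empty, none)
  let result :=
    PySem.List.sorted ((st.1.items).filterMap (fun p => if 2 ≤ p.2 then some p.1 else none))
      (fun x => x) false
  if result = [] then "N" else String.ofList result

-- ===== PRECONDITION & SPEC =====
def Spec_solution (input_string : String) (out : String) : Prop := out = solution_alt input_string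
instance (input_string : String) (out : String) : Decidable (Spec_solution input_string out) := by unfold Spec_solution; infer_instance

-- ===== CLAIM (what is proved, stated in full; the proofs are below) =====
def Claim_equal_solution : Prop := ∀ (input_string : String), Dom_solution input_string → Spec_solution input_string (solution input_string)

-- ===== LEMMAS AND PROOFS =====

/-- Number of maximal runs of `c` in `l`, given the character just before `l` (if any). -/
def runsCnt : Option Char → List Char → Char → Int
  | _, [], _ => 0
  | prev, x :: xs, c => (if prev ≠ some x ∧ x = c then 1 else 0) + runsCnt (some x) xs c

theorem runsCnt_nonneg (l : List Char) (prev : Option Char) (c : Char) : 0 ≤ runsCnt prev l c := by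
  induction l generalizing prev with
  | nil => simp [runsCnt]
  | cons x xs ih =>
    have := ih (some x)
    simp only [runsCnt]
    split <;> omega

/-- Reference recursion for A's loop: chars collected while scanning `l` after prefix `pre`. -/
def collectA : List Char → List Char → List Char
  | _, [] => []
  | pre, x :: xs => (if x ∈ pre ∧ pre.getLast? ≠ some x then [x] else []) ++ collectA (pre ++ [x]) xs

theorem A_fold (s : List Char) (suf pre acc : List Char) (hs : s = pre ++ suf) :
    (PySem.List.pyRange pre.length s.length 1).foldl
      (fun acc i =>
        if check_solo i (PySem.List.pyGetD s i ' ') s then acc ++ [PySem.List.pyGetD s i ' ']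
        else acc) acc = acc ++ collectA pre suf := by
  induction suf generalizing pre acc with
  | nil =>
    have h : s.length = pre.length := by simp [hs]
    rw [h, PySem.List.pyRange_one_eq_nil (le_refl _)]
    simp [collectA]
  | cons x xs ih =>
    have hlen : ((pre.length : Nat) : Int) < ((s.length : Nat) : Int) := by
      subst hs; simp
    rw [PySem.List.pyRange_one_cons hlen, List.foldl_cons]
    have hx : PySem.List.pyGetD s ((pre.length : Nat) : Int) ' ' = x := by
      subst hs
      simp [List.getD_eq_getElem?_getD]
    have hslice : PySem.List.slice s none (some ((pre.length : Nat) : Int)) = pre := by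
      subst hs; rw [PySem.List.slice_to_natCast]; simp
    have hprev : pre ≠ [] →
        PySem.List.pyGet? s (((pre.length : Nat) : Int) - 1) = pre.getLast? := by
      intro hne
      have h0 : 1 ≤ pre.length := List.length_pos_iff.mpr hne
      have h1 : ((pre.length : Nat) : Int) - 1 = ((pre.length - 1 : Nat) : Int) := by
        push_cast [h0]; ring
      rw [h1, PySem.List.pyGet?_natCast, hs, List.getElem?_append_left (by omega),
        List.getLast?_eq_getElem?]
    rw [hx]
    by_cases hcond : x ∈ pre ∧ ¬pre.getLast? = some x
    · have hne : pre ≠ [] := List.ne_nil_of_mem hcond.1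
      have hch : check_solo ((pre.length : Nat) : Int) x s = true := by
        simp only [check_solo, hslice, hprev hne]
        simp [hcond.1, hcond.2]
      rw [hch]
      simp only [if_true]
      have := ih (pre ++ [x]) (acc ++ [x]) (by simp [hs])
      simp only [List.length_append, List.length_singleton] at this
      rw [show ((pre.length : Nat) : Int) + 1 = ((pre.length + 1 : Nat) : Int) by push_cast; ring]
      rw [this]
      simp [collectA, hcond.1, hcond.2, List.append_assoc]
    · have hch : check_solo ((pre.length : Nat) : Int) x s = false := by
        rcases eq_or_ne pre [] with h | hne
        · subst h
          have h0 : PySem.List.slice s none (some 0) = [] := by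
            simpa using hslice
          simp [check_solo, h0]
        · simp only [check_solo, hslice, hprev hne]
          rcases not_and_or.mp hcond with h | h
          · simp [h]
          · have h2 : pre.getLast? = some x := not_not.mp h
            simp [h2]
      rw [hch]
      simp only [Bool.false_eq_true, if_false]
      have := ih (pre ++ [x]) acc (by simp [hs])
      simp only [List.length_append, List.length_singleton] at this
      rw [show ((pre.length : Nat) : Int) + 1 = ((pre.length + 1 : Nat) : Int) by push_cast; ring]
      rw [this]
      have : ¬(x ∈ pre ∧ ¬pre.getLast? = some x) := hcond
      simp [collectA, this]

theorem mem_collectA (l pre : List Char) (c : Char) :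
    c ∈ collectA pre l ↔ (if c ∈ pre then 1 else 2) ≤ runsCnt pre.getLast? l c := by
  induction l generalizing pre with
  | nil =>
    simp only [collectA, List.not_mem_nil, runsCnt, false_iff]
    split <;> omega
  | cons x xs ih =>
    have hr := runsCnt_nonneg xs (some x) c
    simp only [collectA, List.mem_append, runsCnt, ne_eq]
    rw [ih (pre ++ [x]), List.getLast?_concat]
    by_cases hc : c = x <;> by_cases hp : pre.getLast? = some x <;> by_cases hm : c ∈ pre
    all_goals try (subst hc; exact absurd (List.mem_of_getLast? hp) hm)
    all_goals (try subst hc)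
    all_goals simp_all
    all_goals try rw [if_neg (fun h => hc h.symm)]
    all_goals omega

theorem B_fold (l : List Char) (d : PySem.Dict Char Int) (prev : Option Char) (c : Char) :
    ((l.foldl
      (fun (st : PySem.Dict Char Int × Option Char) ch =>
        if some ch ≠ st.2 then (st.1.insert ch (st.1.getD ch 0 + 1), some ch) else st)
      (d, prev)).1).get? c
    = if runsCnt prev l c = 0 then d.get? c else some (d.getD c 0 + runsCnt prev l c) := by
  induction l generalizing d prev with
  | nil => simp [runsCnt]
  | cons x xs ih =>
    have hr := runsCnt_nonneg xs (some x) c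
    simp only [List.foldl_cons, runsCnt]
    by_cases hp : some x = prev
    · rw [if_neg (by simp [hp]), ih d prev, ← hp,
        if_neg (show ¬(some x ≠ some x ∧ x = c) by simp)]
      simp
    · rw [if_pos (by simp [hp]), ih]
      rw [PySem.Dict.get?_insert, PySem.Dict.getD_insert]
      by_cases hc : c = x
      · subst hc
        split_ifs with h1 h2 <;> simp_all <;> omega
      · split_ifs with h1 h2 <;> simp_all

theorem B_nodup (l : List Char) (d : PySem.Dict Char Int) (prev : Option Char)
    (h : d.keys.Nodup) :
    ((l.foldl
      (fun (st : PySem.Dict Char Int × Option Char) ch =>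
        if some ch ≠ st.2 then (st.1.insert ch (st.1.getD ch 0 + 1), some ch) else st)
      (d, prev)).1).keys.Nodup := by
  induction l generalizing d prev with
  | nil => simpa using h
  | cons x xs ih =>
    simp only [List.foldl_cons]
    split
    · exact ih _ _ (PySem.Dict.nodup_keys_insert _ _ _ h)
    · exact ih _ _ h

theorem filterMap_if_eq (l : List (Char × Int)) :
    l.filterMap (fun p => if 2 ≤ p.2 then some p.1 else none)
      = (l.filter (fun p => decide (2 ≤ p.2))).map Prod.fst := by
  induction l with
  | nil => rfl
  | cons p t ih =>
    by_cases h : 2 ≤ p.2 <;> simp [h, ih]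

theorem solution_main (s : String) : solution s = solution_alt s := by
  unfold solution solution_alt
  simp only [PySem.List.len_eq]
  set l := s.toList with hl
  -- A's loop is collectA [] l
  have hA : (PySem.List.pyRange 0 (l.length : Int) 1).foldl
      (fun acc i =>
        if check_solo i (PySem.List.pyGetD l i ' ') l then acc ++ [PySem.List.pyGetD l i ' ']
        else acc) ([] : List Char) = collectA [] l := by
    simpa using A_fold l l [] [] rfl
  rw [hA]
  -- B's dict lookup counts runs
  have hB : ∀ c, ((l.foldl
      (fun (st : PySem.Dict Char Int × Option Char) ch =>
        if some ch ≠ st.2 then (st.1.insert ch (st.1.getD ch 0 + 1), some ch) else st)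
      (PySem.Dict.empty, none)).1).get? c
      = if runsCnt none l c = 0 then none else some (runsCnt none l c) := by
    intro c
    rw [B_fold]
    simp [PySem.Dict.get?_empty, PySem.Dict.getD_empty]
  set D := (l.foldl
      (fun (st : PySem.Dict Char Int × Option Char) ch =>
        if some ch ≠ st.2 then (st.1.insert ch (st.1.getD ch 0 + 1), some ch) else st)
      (PySem.Dict.empty, none)).1 with hD
  have hNd : D.keys.Nodup := B_nodup l _ none (by simp [PySem.Dict.keys_empty])
  set R := D.items.filterMap (fun p => if 2 ≤ p.2 then some p.1 else none) with hR
  have hAmem : ∀ c, c ∈ collectA [] l ↔ 2 ≤ runsCnt none l c := by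
    intro c
    rw [mem_collectA]
    simp
  have hRmem : ∀ c, c ∈ R ↔ 2 ≤ runsCnt none l c := by
    intro c
    rw [hR, List.mem_filterMap]
    constructor
    · rintro ⟨p, hp, hfp⟩
      by_cases h2 : 2 ≤ p.2
      · rw [if_pos h2] at hfp
        obtain rfl : p.1 = c := Option.some.inj hfp
        have hget : D.get? p.1 = some p.2 := PySem.Dict.get?_of_mem_items D (by simpa using hp) hNd
        rw [hB p.1] at hget
        split at hget
        · exact absurd hget (by simp)
        · have := Option.some.inj hget
          omega
      · rw [if_neg h2] at hfp
        exact absurd hfp (by simp)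
    · intro h2
      have hr0 : ¬runsCnt none l c = 0 := by omega
      have hget : D.get? c = some (runsCnt none l c) := by rw [hB c, if_neg hr0]
      refine ⟨(c, runsCnt none l c), PySem.Dict.mem_items_of_get?_eq_some D hget, ?_⟩
      rw [if_pos h2]
  have hRnodup : R.Nodup := by
    rw [hR, filterMap_if_eq]
    exact hNd.sublist (List.filter_sublist.map Prod.fst)
  have hperm : (PySem.Set.ofList (collectA [] l)).Perm R := by
    rw [List.perm_ext_iff_of_nodup (PySem.Set.nodup_ofList _) hRnodup]
    intro c
    rw [PySem.Set.mem_ofList, hAmem, hRmem]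
  have hsorted : PySem.List.sorted (PySem.Set.ofList (collectA [] l)) (fun x => x) false
      = PySem.List.sorted R (fun x => x) false :=
    (PySem.List.sorted_id_eq_sorted_id_iff_perm _ _).mpr hperm
  by_cases hE : collectA [] l = []
  · rw [if_pos hE]
    have hRnil : R = [] := by
      rw [List.eq_nil_iff_forall_not_mem]
      intro c hc
      have := (hRmem c).mp hc
      have := (hAmem c).mpr this
      simp [hE] at this
    rw [if_pos (by rw [hRnil]; simp [PySem.List.sorted_eq_nil_iff])]
  · rw [if_neg hE]
    have hRne : ¬PySem.List.sorted R (fun x => x) false = [] := by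
      rw [PySem.List.sorted_eq_nil_iff]
      intro hRnil
      apply hE
      rw [List.eq_nil_iff_forall_not_mem]
      intro c hc
      have := (hRmem c).mpr ((hAmem c).mp hc)
      simp [hRnil] at this
    rw [if_neg hRne, hsorted]

-- ===== VERDICT (by name: the statement is the Claim_ definition above) =====
theorem solution_spec : Claim_equal_solution := by
  intro s _
  exact solution_main s
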